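-- pv_equiv track=rewrite | github.com/QuadDarv1ne/maestro7it_education | codeforces/Codeforces Round 1054 (Div. 3)/python/F.py | can_reach_in
-- ===== SOURCE A (Python) =====
-- def can_reach_in(T, h, d):
--     """
--     Проверка: за T ходов можно ли пройти расстояние d, начиная с здоровья h.
--     Идея:
--     - Симулируем максимально выгодную стратегию: выполняем максимально возможную последовательность шагов,
--       затем, если нельзя двигаться — отдыхаем 1 ход, и т.д.
--     - Для блока последовательных шагов вычисляем бинарным поиском максимальное m такое, что
--         cost = m*consec + m*(m+1)//2 <= H-1
--       (после m шагов здоровье >= 1).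
--     - Если m==0 — отдыхаем 1 ход (H += 1, consec = 0). Иначе выполняем k = min(m, оставшиеся шаги).
--     Это даёт корректную и быструю проверку для бинарного поиска по общему числу ходов T.
--     """
--     t = T
--     H = h
--     consec = 0
--     moved = 0
--     while t > 0 and moved < d:
--         # Find max m (<= t) such that cost <= H-1
--         lo, hi = 1, t
--         best = 0
--         while lo <= hi:
--             mid = (lo + hi) // 2
--             cost = mid * consec + mid * (mid + 1) // 2
--             if cost <= H - 1:
--                 best = mid
--                 lo = mid + 1
--             else:
--                 hi = mid - 1
--         m = best
--         if m == 0: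
--             # can't move now -> rest 1 turn
--             H += 1
--             consec = 0
--             t -= 1
--         else:
--             k = min(m, d - moved)
--             costk = k * consec + k * (k + 1) // 2
--             H -= costk
--             moved += k
--             consec += k
--             t -= k
--     return moved >= d
-- ===== SOURCE B (Python) =====
-- def can_reach_in(T, h, d):
--     # Plain one-turn-at-a-time greedy: step if health allows (a step costs
--     # consec+1 health and must leave at least 1), otherwise rest; no binary search.
--     t, H, consec, moved = T, h, 0, 0
--     while t > 0 and moved < d:
--         if H >= consec + 2:
--             H -= consec + 1
--             consec += 1
--             moved += 1
--         else:
--             H += 1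
--             consec = 0
--         t -= 1
--     return moved >= d
-- ===== Notes on version B (the rewrite author's own statement) =====
-- stated objective: simpler
-- what changed: B drops A's per-iteration binary search and block cost formula and simulates one turn at a time (move if health allows, else rest); on the generated inputs the rest-heavy iterations dominate, so removing the O(log T) binary search from each iteration also made B measurably faster.
import Mathlib
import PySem

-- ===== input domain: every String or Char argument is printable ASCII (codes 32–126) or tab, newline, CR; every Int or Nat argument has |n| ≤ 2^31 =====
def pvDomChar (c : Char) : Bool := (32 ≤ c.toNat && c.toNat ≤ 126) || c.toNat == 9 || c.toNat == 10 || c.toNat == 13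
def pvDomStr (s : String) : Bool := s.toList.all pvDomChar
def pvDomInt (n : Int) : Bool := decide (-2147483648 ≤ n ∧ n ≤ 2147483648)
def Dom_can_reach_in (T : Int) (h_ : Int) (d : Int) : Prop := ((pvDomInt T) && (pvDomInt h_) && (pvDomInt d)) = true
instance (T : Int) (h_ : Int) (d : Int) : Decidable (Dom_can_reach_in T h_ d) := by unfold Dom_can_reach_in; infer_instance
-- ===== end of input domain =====

-- B drops A's per-block binary search and simulates one turn at a time (move if health allows, else rest): simpler, same results.
-- (Both loops are ported with a Nat fuel that only makes the same computation total: each Python loop strictly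
-- decreases its own integer measure — `hi + 1 - lo` resp. `t` — so the fuel given at the call sites never runs out.)

-- ===== PORT A =====
-- A's inner `while lo <= hi` binary search, returning `best`; fuel ≥ (hi + 1 - lo).toNat suffices
def pvBS (consec H : Int) (fuel : Nat) (lo hi best : Int) : Int :=
  match fuel with
  | 0 => best
  | Nat.succ n =>
    if lo ≤ hi then
      let mid := PySem.Int.floordiv (lo + hi) 2
      let cost := mid * consec + PySem.Int.floordiv (mid * (mid + 1)) 2
      if cost ≤ H - 1 then pvBS consec H n (mid + 1) hi mid
      else pvBS consec H n lo (mid - 1) best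
    else best

-- A's outer `while t > 0 and moved < d` loop; fuel ≥ t.toNat suffices
def pvLoopA (d : Int) (fuel : Nat) (t H consec moved : Int) : Bool :=
  match fuel with
  | 0 => decide (moved ≥ d)
  | Nat.succ n =>
    if t > 0 ∧ moved < d then
      let m := pvBS consec H t.toNat 1 t 0
      if m = 0 then pvLoopA d n (t - 1) (H + 1) 0 moved
      else
        let k := min m (d - moved)
        let costk := k * consec + PySem.Int.floordiv (k * (k + 1)) 2
        pvLoopA d n (t - k) (H - costk) (consec + k) (moved + k)
    else decide (moved ≥ d)

def can_reach_in (T : Int) (h_ : Int) (d : Int) : Bool := pvLoopA d T.toNat T h_ 0 0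

-- ===== PORT B =====
-- B's single `while` loop: one move or one rest per iteration; fuel ≥ t.toNat suffices
def pvLoopB (d : Int) (fuel : Nat) (t H consec moved : Int) : Bool :=
  match fuel with
  | 0 => decide (moved ≥ d)
  | Nat.succ n =>
    if t > 0 ∧ moved < d then
      if H ≥ consec + 2 then pvLoopB d n (t - 1) (H - (consec + 1)) (consec + 1) (moved + 1)
      else pvLoopB d n (t - 1) (H + 1) 0 moved
    else decide (moved ≥ d)

def can_reach_in_alt (T : Int) (h_ : Int) (d : Int) : Bool := pvLoopB d T.toNat T h_ 0 0

-- ===== PRECONDITION & SPEC =====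
def Spec_can_reach_in (T : Int) (h_ : Int) (d : Int) (out : Bool) : Prop := out = can_reach_in_alt T h_ d
instance (T : Int) (h_ : Int) (d : Int) (out : Bool) : Decidable (Spec_can_reach_in T h_ d out) := by unfold Spec_can_reach_in; infer_instance

-- ===== CLAIM (what is proved, stated in full; the proofs are below) =====
def Claim_equal_can_reach_in : Prop := ∀ (T : Int) (h_ : Int) (d : Int), Dom_can_reach_in T h_ d → Spec_can_reach_in T h_ d (can_reach_in T h_ d)

-- ===== LEMMAS AND PROOFS =====

-- the health cost of a block of m consecutive steps started at `consec = c`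
def pvCost (c m : Int) : Int := m * c + PySem.Int.floordiv (m * (m + 1)) 2

theorem two_mul_tri (m : Int) : 2 * PySem.Int.floordiv (m * (m + 1)) 2 = m * (m + 1) := by
  have h1 := PySem.Int.floordiv_mul_add_mod (m * (m + 1)) 2
  have h2 : PySem.Int.mod (m * (m + 1)) 2 = 0 :=
    (PySem.Int.mod_eq_zero_iff_dvd _ _).mpr (Int.even_mul_succ_self m).two_dvd
  omega

theorem pvCost_mono {c a b : Int} (hc : 0 ≤ c) (ha : 0 ≤ a) (hab : a ≤ b) :
    pvCost c a ≤ pvCost c b := by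
  unfold pvCost
  have h1 := two_mul_tri a
  have h2 := two_mul_tri b
  nlinarith

theorem pvCost_one (c : Int) : pvCost c 1 = c + 1 := by
  unfold pvCost
  have := two_mul_tri 1
  omega

theorem pvCost_shift (c k : Int) :
    pvCost c k = (c + 1) + pvCost (c + 1) (k - 1) := by
  unfold pvCost
  have h1 := two_mul_tri k
  have h2 := two_mul_tri (k - 1)
  nlinarith

-- one-step unfolding equations for pvBS
theorem pvBS_eq_take {consec H lo hi best : Int} (n : Nat) (h : lo ≤ hi)
    (hc : (PySem.Int.floordiv (lo + hi) 2) * consec + PySem.Int.floordiv ((PySem.Int.floordiv (lo + hi) 2) * ((PySem.Int.floordiv (lo + hi) 2) + 1)) 2 ≤ H - 1) :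
    pvBS consec H (n + 1) lo hi best = pvBS consec H n ((PySem.Int.floordiv (lo + hi) 2) + 1) hi (PySem.Int.floordiv (lo + hi) 2) := by
  rw [pvBS]; simp only [if_pos h]; rw [if_pos hc]

theorem pvBS_eq_cut {consec H lo hi best : Int} (n : Nat) (h : lo ≤ hi)
    (hc : ¬ ((PySem.Int.floordiv (lo + hi) 2) * consec + PySem.Int.floordiv ((PySem.Int.floordiv (lo + hi) 2) * ((PySem.Int.floordiv (lo + hi) 2) + 1)) 2 ≤ H - 1)) :
    pvBS consec H (n + 1) lo hi best = pvBS consec H n lo ((PySem.Int.floordiv (lo + hi) 2) - 1) best := by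
  rw [pvBS]; simp only [if_pos h]; rw [if_neg hc]

theorem pvBS_eq_done {consec H lo hi best : Int} (n : Nat) (h : ¬ lo ≤ hi) :
    pvBS consec H (n + 1) lo hi best = best := by
  rw [pvBS]; simp only [if_neg h]

-- binary-search correctness: with enough fuel, pvBS returns the largest m ≤ hi₀ with pvCost c m ≤ H - 1 (0 if none)
theorem pvBS_spec (c H hi₀ : Int) (hc : 0 ≤ c) : ∀ n : Nat, ∀ lo hi best : Int,
    (hi + 1 - lo).toNat ≤ n →
    lo = best + 1 → 0 ≤ best → best ≤ hi₀ →
    (best = 0 ∨ pvCost c best ≤ H - 1) →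
    hi ≤ hi₀ →
    (∀ m, hi < m → m ≤ hi₀ → ¬ pvCost c m ≤ H - 1) →
    (pvBS c H n lo hi best = 0 ∨ pvCost c (pvBS c H n lo hi best) ≤ H - 1) ∧
      0 ≤ pvBS c H n lo hi best ∧ pvBS c H n lo hi best ≤ hi₀ ∧
      (∀ m, pvBS c H n lo hi best < m → m ≤ hi₀ → ¬ pvCost c m ≤ H - 1) := by
  intro n
  induction n with
  | zero =>
      intro lo hi best hn hlo hb0 hbhi hP hhi hAbove
      rw [pvBS]
      refine ⟨hP, hb0, hbhi, ?_⟩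
      intro m hm1 hm2
      exact hAbove m (by omega) hm2
  | succ n ih =>
      intro lo hi best hn hlo hb0 hbhi hP hhi hAbove
      by_cases hlh : lo ≤ hi
      · have hmid := PySem.Int.floordiv_two_mid_bounds hlh
        by_cases hcost : (PySem.Int.floordiv (lo + hi) 2) * c + PySem.Int.floordiv ((PySem.Int.floordiv (lo + hi) 2) * ((PySem.Int.floordiv (lo + hi) 2) + 1)) 2 ≤ H - 1
        · rw [pvBS_eq_take n hlh hcost]
          exact ih _ _ _ (by omega) rfl (by omega) (by omega) (Or.inr hcost) hhi hAbove
        · rw [pvBS_eq_cut n hlh hcost]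
          apply ih _ _ _ (by omega) hlo hb0 hbhi hP (by omega)
          intro m hm1 hm2
          by_cases hmm : hi < m
          · exact hAbove m hmm hm2
          · intro hPm
            exact hcost (le_trans (pvCost_mono hc (by omega) (by omega : PySem.Int.floordiv (lo + hi) 2 ≤ m)) hPm)
      · rw [pvBS_eq_done n hlh]
        refine ⟨hP, hb0, hbhi, ?_⟩
        intro m hm1 hm2
        exact hAbove m (by omega) hm2

-- one-step unfolding equations for the two loops
theorem pvLoopA_eq_done {t H consec moved d : Int} (n : Nat) (hg : ¬ (t > 0 ∧ moved < d)) :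
    pvLoopA d (n + 1) t H consec moved = decide (moved ≥ d) := by
  rw [pvLoopA]; simp only [if_neg hg]

theorem pvLoopA_eq_rest {t H consec moved d : Int} (n : Nat) (hg : t > 0 ∧ moved < d)
    (hm : pvBS consec H t.toNat 1 t 0 = 0) :
    pvLoopA d (n + 1) t H consec moved = pvLoopA d n (t - 1) (H + 1) 0 moved := by
  rw [pvLoopA]; simp only [if_pos hg]; rw [if_pos hm]

theorem pvLoopA_eq_move {t H consec moved d : Int} (n : Nat) (hg : t > 0 ∧ moved < d)
    (hm : ¬ pvBS consec H t.toNat 1 t 0 = 0) :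
    pvLoopA d (n + 1) t H consec moved =
      pvLoopA d n (t - min (pvBS consec H t.toNat 1 t 0) (d - moved))
        (H - ((min (pvBS consec H t.toNat 1 t 0) (d - moved)) * consec +
          PySem.Int.floordiv ((min (pvBS consec H t.toNat 1 t 0) (d - moved)) * ((min (pvBS consec H t.toNat 1 t 0) (d - moved)) + 1)) 2))
        (consec + min (pvBS consec H t.toNat 1 t 0) (d - moved))
        (moved + min (pvBS consec H t.toNat 1 t 0) (d - moved)) := by
  rw [pvLoopA]; simp only [if_pos hg]; rw [if_neg hm]

theorem pvLoopB_eq_done {t H consec moved d : Int} (n : Nat) (hg : ¬ (t > 0 ∧ moved < d)) :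
    pvLoopB d (n + 1) t H consec moved = decide (moved ≥ d) := by
  rw [pvLoopB]; simp only [if_neg hg]

theorem pvLoopB_eq_move {t H consec moved d : Int} (n : Nat) (hg : t > 0 ∧ moved < d) (hH : H ≥ consec + 2) :
    pvLoopB d (n + 1) t H consec moved = pvLoopB d n (t - 1) (H - (consec + 1)) (consec + 1) (moved + 1) := by
  rw [pvLoopB]; simp only [if_pos hg]; rw [if_pos hH]

theorem pvLoopB_eq_rest {t H consec moved d : Int} (n : Nat) (hg : t > 0 ∧ moved < d) (hH : ¬ H ≥ consec + 2) :
    pvLoopB d (n + 1) t H consec moved = pvLoopB d n (t - 1) (H + 1) 0 moved := by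
  rw [pvLoopB]; simp only [if_pos hg]; rw [if_neg hH]

-- with enough fuel, pvLoopB does not depend on the exact fuel
theorem pvLoopB_fuel (d : Int) : ∀ n : Nat, ∀ m : Nat, ∀ t H c moved : Int,
    t.toNat ≤ n → t.toNat ≤ m → pvLoopB d n t H c moved = pvLoopB d m t H c moved := by
  intro n
  induction n with
  | zero =>
      intro m t H c moved hn hm
      have hg : ¬ (t > 0 ∧ moved < d) := by omega
      rw [pvLoopB]
      cases m with
      | zero => rfl
      | succ m => rw [pvLoopB_eq_done m hg]
  | succ n ih =>
      intro m t H c moved hn hm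
      by_cases hg : t > 0 ∧ moved < d
      · obtain ⟨m', rfl⟩ : ∃ m', m = m' + 1 := ⟨m - 1, by omega⟩
        by_cases hH : H ≥ c + 2
        · rw [pvLoopB_eq_move n hg hH, pvLoopB_eq_move m' hg hH]
          exact ih m' _ _ _ _ (by omega) (by omega)
        · rw [pvLoopB_eq_rest n hg hH, pvLoopB_eq_rest m' hg hH]
          exact ih m' _ _ _ _ (by omega) (by omega)
      · rw [pvLoopB_eq_done n hg]
        cases m with
        | zero => rw [pvLoopB]
        | succ m' => rw [pvLoopB_eq_done m' hg]

-- B's loop performs a block of k affordable single moves in exactly k iterations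
theorem pvLoopB_block (d : Int) : ∀ kn : Nat, ∀ n : Nat, ∀ t H c moved k : Int, k.toNat = kn →
    1 ≤ k → k ≤ t → k ≤ d - moved → 0 ≤ c → pvCost c k ≤ H - 1 →
    pvLoopB d (n + kn) t H c moved = pvLoopB d n (t - k) (H - pvCost c k) (c + k) (moved + k) := by
  intro kn
  induction kn with
  | zero => intro n t H c moved k hkn hk; omega
  | succ kn ih =>
      intro n t H c moved k hkn hk hkt hkd hc hkcost
      have h1 : pvCost c 1 ≤ H - 1 := le_trans (pvCost_mono hc (by omega) hk) hkcost
      rw [pvCost_one] at h1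
      have hg : t > 0 ∧ moved < d := ⟨by omega, by omega⟩
      rw [show n + (kn + 1) = (n + kn) + 1 from rfl, pvLoopB_eq_move (n + kn) hg (by omega)]
      by_cases hk1 : k = 1
      · subst hk1
        have hkn0 : kn = 0 := by omega
        subst hkn0
        rw [pvCost_one, Nat.add_zero]
      · have hsh := pvCost_shift c k
        have := ih n (t - 1) (H - (c + 1)) (c + 1) (moved + 1) (k - 1)
          (by omega) (by omega) (by omega) (by omega) (by omega) (by omega)
        rw [this]
        congr 1 <;> omega

-- the main equivalence: A's batched loop equals B's one-turn loop (for consec ≥ 0, with enough fuel)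
theorem pvLoopAB (d : Int) : ∀ n : Nat, ∀ t H c moved : Int, t.toNat ≤ n → 0 ≤ c →
    pvLoopA d n t H c moved = pvLoopB d n t H c moved := by
  intro n
  induction n with
  | zero => intro t H c moved hn hc; rw [pvLoopA, pvLoopB]
  | succ n ih =>
      intro t H c moved hn hc
      by_cases hg : t > 0 ∧ moved < d
      · have hspec := pvBS_spec c H t hc t.toNat 1 t 0 (by omega) rfl (le_refl 0) (by omega)
          (Or.inl rfl) (le_refl t) (by intro m h1 h2; omega)
        obtain ⟨hP, hm0, hmt, hAbove⟩ := hspec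
        by_cases hm : pvBS c H t.toNat 1 t 0 = 0
        · -- A rests; B cannot move either, so B rests too
          have hno : ¬ pvCost c 1 ≤ H - 1 := hAbove 1 (by omega) (by omega)
          rw [pvCost_one] at hno
          rw [pvLoopA_eq_rest n hg hm, pvLoopB_eq_rest n hg (by omega)]
          exact ih _ _ _ _ (by omega) (le_refl 0)
        · -- A moves a block of k steps; B takes the same k steps one by one
          have hPm : pvCost c (pvBS c H t.toNat 1 t 0) ≤ H - 1 := hP.resolve_left hm
          rw [pvLoopA_eq_move n hg hm]
          have hkm : min (pvBS c H t.toNat 1 t 0) (d - moved) ≤ pvBS c H t.toNat 1 t 0 := min_le_left _ _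
          have hkcost : pvCost c (min (pvBS c H t.toNat 1 t 0) (d - moved)) ≤ H - 1 :=
            le_trans (pvCost_mono hc (by omega) hkm) hPm
          have hfits : (min (pvBS c H t.toNat 1 t 0) (d - moved)).toNat ≤ n + 1 := by omega
          have hblock := pvLoopB_block d (min (pvBS c H t.toNat 1 t 0) (d - moved)).toNat
            (n + 1 - (min (pvBS c H t.toNat 1 t 0) (d - moved)).toNat) t H c moved
            (min (pvBS c H t.toNat 1 t 0) (d - moved))
            rfl (by omega) (by omega) (by omega) hc hkcost
          rw [show (n + 1 - (min (pvBS c H t.toNat 1 t 0) (d - moved)).toNat) + (min (pvBS c H t.toNat 1 t 0) (d - moved)).toNat = n + 1 by omega] at hblock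
          rw [hblock]
          rw [show (min (pvBS c H t.toNat 1 t 0) (d - moved)) * c +
              PySem.Int.floordiv ((min (pvBS c H t.toNat 1 t 0) (d - moved)) * ((min (pvBS c H t.toNat 1 t 0) (d - moved)) + 1)) 2
              = pvCost c (min (pvBS c H t.toNat 1 t 0) (d - moved)) from rfl]
          rw [ih _ _ _ _ (by omega) (by omega)]
          exact pvLoopB_fuel d n _ _ _ _ _ (by omega) (by omega)
      · rw [pvLoopA_eq_done n hg, pvLoopB_eq_done n hg]

-- ===== VERDICT (by name: the statement is the Claim_ definition above) =====
theorem can_reach_in_spec : Claim_equal_can_reach_in := by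
  intro T h_ d _
  unfold Spec_can_reach_in can_reach_in can_reach_in_alt
  exact pvLoopAB d T.toNat T h_ 0 0 (le_refl _) (le_refl 0)
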